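-- pv_equiv track=rewrite | github.com/nachtflug6/academic-writing-template | scripts/generate_citekey_claim_report.py | strip_comments_preserve
-- ===== SOURCE A (Python) =====
-- from typing import Dict, List, Optional, Set, Tuple
--
-- def strip_comments_preserve(text: str) -> str:
--     """Strip LaTeX comments while preserving text length and line positions."""
--     out_chars: List[str] = []
--     i = 0
--     length = len(text)
--     while i < length:
--         ch = text[i]
--         if ch == "%":
--             # Count backslashes immediately before % to determine escaping.
--             backslashes = 0
--             j = i - 1
--             while j >= 0 and text[j] == "\\":
--                 backslashes += 1
--                 j -= 1
--             escaped = (backslashes % 2) == 1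
--             if not escaped:
--                 # Replace comment text with spaces until newline so offsets stay stable.
--                 while i < length and text[i] != "\n":
--                     out_chars.append(" ")
--                     i += 1
--                 continue
--         out_chars.append(ch)
--         i += 1
--     return "".join(out_chars)
-- ===== SOURCE B (Python) =====
-- def strip_comments_preserve(text: str) -> str:
--     """Strip LaTeX comments length-preservingly, one line at a time."""
--     lines = text.split('\n')
--     res = []
--     for line in lines:
--         for k, ch in enumerate(line):
--             if ch == '%':
--                 b = 0
--                 while k - b - 1 >= 0 and line[k - b - 1] == '\\':
--                     b += 1
--                 if b % 2 == 0:
--                     line = line[:k] + ' ' * (len(line) - k)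
--                     break
--         res.append(line)
--     return '\n'.join(res)
-- ===== Notes on version B (the rewrite author's own statement) =====
-- stated objective: faster
-- what changed: Replaces A's character-by-character index walk over the whole text (with a backward backslash-counting loop and an inner blanking loop) by a per-line pass: split the text into lines, blank each line from its first unescaped percent sign using one slice plus a space-repeat, and join the lines back.
import Mathlib
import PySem

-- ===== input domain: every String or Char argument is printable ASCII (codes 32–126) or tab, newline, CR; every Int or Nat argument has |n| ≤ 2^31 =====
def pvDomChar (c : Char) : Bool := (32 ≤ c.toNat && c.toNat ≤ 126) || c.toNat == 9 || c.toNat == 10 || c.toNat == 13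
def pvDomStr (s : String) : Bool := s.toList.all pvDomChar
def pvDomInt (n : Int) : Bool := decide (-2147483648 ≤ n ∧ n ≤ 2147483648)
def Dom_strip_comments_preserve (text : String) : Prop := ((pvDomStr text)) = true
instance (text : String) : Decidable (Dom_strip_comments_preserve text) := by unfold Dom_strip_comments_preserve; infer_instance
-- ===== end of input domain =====

-- B re-decomposes A's single index loop (with backward backslash counting and an inner
-- blanking loop) into a per-line pass: split on '\n', blank each line from its first
-- unescaped percent sign, join back; measured constant-factor faster (bulk string ops).

-- ===== PORT A =====
-- A walks the text with an index i, looks back at text[j] to count backslashes, and an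
-- inner while blanks forward to the newline.  Ported as a zipper: `prevRev` is the
-- already-scanned original text reversed (the look-back while-loop becomes counting the
-- leading '\\' of `prevRev`), `rest` is text[i:]; the blanking while-loop is `pvBlankA`.
def pvCountBack : List Char → Nat
  | [] => 0
  | c :: p => if c = '\\' then pvCountBack p + 1 else 0

mutual
def pvGoA : List Char → List Char → List Char
  | _, [] => []
  | prevRev, ch :: rs =>
    if ch = '%' ∧ pvCountBack prevRev % 2 ≠ 1 then
      pvBlankA prevRev (ch :: rs)
    else ch :: pvGoA (ch :: prevRev) rs
termination_by _ rest => 2 * rest.length + 1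
decreasing_by all_goals (simp; try omega)
def pvBlankA : List Char → List Char → List Char
  | _, [] => []
  | prevRev, ch :: rs =>
    if ch = '\n' then ch :: pvGoA (ch :: prevRev) rs
    else ' ' :: pvBlankA (ch :: prevRev) rs
termination_by _ rest => 2 * rest.length
decreasing_by all_goals (simp; try omega)
end

def strip_comments_preserve (text : String) : String :=
  String.mk (pvGoA [] text.toList)

-- ===== PORT B =====
-- text.split('\n') ported by hand (exact for this single-character separator).
def pvSplitNL : List Char → List (List Char)
  | [] => [[]]
  | c :: cs =>
    if c = '\n' then [] :: pvSplitNL cs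
    else match pvSplitNL cs with
      | [] => [[c]]          -- unreachable: pvSplitNL never returns []
      | l :: ls => (c :: l) :: ls

-- '\n'.join(res), ported by hand (exact).
def pvJoinNL : List (List Char) → List Char
  | [] => []
  | [l] => l
  | l :: ls => l ++ '\n' :: pvJoinNL ls

-- the backward while-loop counting backslashes at line[k-b-1]
def pvBsB (line : List Char) (k b : Nat) : Nat :=
  if b + 1 ≤ k ∧ line.getD (k - b - 1) ' ' = '\\' then pvBsB line k (b + 1) else b
termination_by k - b
decreasing_by omega

-- the `for k, ch in enumerate(line)` loop, as an index recursion
def pvScanB (line : List Char) (k : Nat) : List Char :=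
  if h : k < line.length then
    if line.get ⟨k, h⟩ = '%' ∧ pvBsB line k 0 % 2 = 0 then
      line.take k ++ List.replicate (line.length - k) ' '
    else pvScanB line (k + 1)
  else line
termination_by line.length - k

def strip_comments_preserve_alt (text : String) : String :=
  String.mk (pvJoinNL ((pvSplitNL text.toList).map (fun l => pvScanB l 0)))

-- ===== PRECONDITION & SPEC =====
def Spec_strip_comments_preserve (text : String) (out : String) : Prop := out = strip_comments_preserve_alt text
instance (text : String) (out : String) : Decidable (Spec_strip_comments_preserve text out) := by unfold Spec_strip_comments_preserve; infer_instance

-- ===== CLAIM (what is proved, stated in full; the proofs are below) =====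
def Claim_equal_strip_comments_preserve : Prop := ∀ (text : String), Dom_strip_comments_preserve text → Spec_strip_comments_preserve text (strip_comments_preserve text)

-- ===== LEMMAS AND PROOFS =====

-- Proof-side reference: one-pass line processing carrying the pending backslash run.
def pvProc (bs : Nat) : List Char → List Char
  | [] => []
  | c :: cs =>
    if c = '%' ∧ bs % 2 = 0 then List.replicate (cs.length + 1) ' '
    else c :: pvProc (if c = '\\' then bs + 1 else 0) cs

theorem pvCountBack_cons (c : Char) (p : List Char) :
    pvCountBack (c :: p) = if c = '\\' then pvCountBack p + 1 else 0 := rfl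

theorem pvBlankA_no_nl (suf : List Char) (p : List Char) (h : '\n' ∉ suf) :
    pvBlankA p suf = List.replicate suf.length ' ' := by
  induction suf generalizing p with
  | nil => simp [pvBlankA]
  | cons c cs ih =>
    have hc : c ≠ '\n' := fun hh => h (hh ▸ List.mem_cons_self ..)
    rw [pvBlankA, if_neg hc, ih _ (fun hm => h (List.mem_cons_of_mem _ hm))]
    simp [List.replicate_succ]

theorem pvBlankA_nl (suf : List Char) (p rs : List Char) (h : '\n' ∉ suf) :
    pvBlankA p (suf ++ '\n' :: rs)
      = List.replicate suf.length ' ' ++ '\n' :: pvGoA ('\n' :: (suf.reverse ++ p)) rs := by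
  induction suf generalizing p with
  | nil => simp [pvBlankA]
  | cons c cs ih =>
    have hc : c ≠ '\n' := fun hh => h (hh ▸ List.mem_cons_self ..)
    rw [List.cons_append, pvBlankA, if_neg hc, ih _ (fun hm => h (List.mem_cons_of_mem _ hm))]
    simp [List.replicate_succ]

theorem pvGoA_line (line : List Char) (p : List Char) (bs : Nat)
    (h : '\n' ∉ line) (hp : pvCountBack p = bs) :
    pvGoA p line = pvProc bs line ∧
    (∀ rs, pvGoA p (line ++ '\n' :: rs)
        = pvProc bs line ++ '\n' :: pvGoA ('\n' :: (line.reverse ++ p)) rs) := by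
  induction line generalizing p bs with
  | nil =>
    refine ⟨by simp [pvGoA, pvProc], fun rs => ?_⟩
    simp [pvGoA, pvProc]
  | cons c cs ih =>
    have hc : c ≠ '\n' := fun hh => h (hh ▸ List.mem_cons_self ..)
    have hcs : '\n' ∉ cs := fun hm => h (List.mem_cons_of_mem _ hm)
    by_cases hcut : c = '%' ∧ bs % 2 = 0
    · have hcond : c = '%' ∧ pvCountBack p % 2 ≠ 1 := ⟨hcut.1, by omega⟩
      constructor
      · rw [pvGoA, if_pos hcond, pvBlankA_no_nl _ _ h, pvProc, if_pos hcut]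
        simp
      · intro rs
        rw [List.cons_append, pvGoA, if_pos hcond, ← List.cons_append, pvBlankA_nl _ _ _ h,
          pvProc, if_pos hcut]
        simp
    · have hcond : ¬ (c = '%' ∧ pvCountBack p % 2 ≠ 1) := by
        intro ⟨h1, h2⟩; exact hcut ⟨h1, by omega⟩
      have hp' : pvCountBack (c :: p) = if c = '\\' then bs + 1 else 0 := by
        rw [pvCountBack_cons, hp]
      obtain ⟨ih1, ih2⟩ := ih (c :: p) _ hcs hp'
      constructor
      · rw [pvGoA, if_neg hcond, pvProc, if_neg hcut, ih1]
      · intro rs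
        rw [List.cons_append, pvGoA, if_neg hcond, pvProc, if_neg hcut, ih2 rs]
        simp

theorem pvTake_rev (line : List Char) (j : Nat) (h0 : 0 < j) (hj : j ≤ line.length) :
    (line.take j).reverse = line.getD (j - 1) ' ' :: (line.take (j - 1)).reverse := by
  have h1 : j - 1 < line.length := by
    omega
  have h2 : line.take j = line.take (j - 1) ++ [line.get ⟨j - 1, h1⟩] := by
    have h3 := List.take_succ_eq_append_getElem (l := line) (i := j - 1) h1
    rw [Nat.sub_add_cancel h0] at h3
    simpa using h3
  rw [h2, List.reverse_append, List.getD_eq_getElem _ _ h1]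
  simp

theorem pvBsB_eq (line : List Char) (k : Nat) (hk : k ≤ line.length) :
    ∀ (m b : Nat), k - b ≤ m → b ≤ k →
      pvBsB line k b = b + pvCountBack ((line.take (k - b)).reverse) := by
  intro m
  induction m with
  | zero =>
    intro b hm hb
    have hkb : k - b = 0 := by omega
    rw [pvBsB, if_neg (by omega), hkb]
    simp [pvCountBack]
  | succ m ih =>
    intro b hm hb
    by_cases hc : b + 1 ≤ k ∧ line.getD (k - b - 1) ' ' = '\\'
    · rw [pvBsB, if_pos hc, ih (b + 1) (by omega) (by omega)]
      rw [pvTake_rev line (k - b) (by omega) (by omega), pvCountBack_cons]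
      rw [show k - b - 1 = k - (b + 1) from by omega] at hc ⊢
      rw [hc.2, if_pos rfl]
      omega
    · rw [pvBsB, if_neg hc]
      rcases Nat.eq_or_lt_of_le hb with heq | hlt
      · rw [heq]
        simp [pvCountBack]
      · have hnb : ¬ line.getD (k - b - 1) ' ' = '\\' := fun hh => hc ⟨by omega, hh⟩
        rw [pvTake_rev line (k - b) (by omega) (by omega), pvCountBack_cons, if_neg hnb]
        omega

theorem pvScanB_eq (line : List Char) :
    ∀ (m k : Nat), line.length - k ≤ m → k ≤ line.length →
      pvScanB line k
        = line.take k ++ pvProc (pvCountBack ((line.take k).reverse)) (line.drop k) := by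
  intro m
  induction m with
  | zero =>
    intro k hm hk
    have hkl : k = line.length := by omega
    rw [pvScanB, dif_neg (by omega), hkl]
    simp [pvProc]
  | succ m ih =>
    intro k hm hk
    by_cases hlt : k < line.length
    case neg =>
      have hkl : k = line.length := by omega
      rw [pvScanB, dif_neg hlt, hkl]
      simp [pvProc]
    · have hbs : pvBsB line k 0 = pvCountBack ((line.take k).reverse) := by
        simpa using pvBsB_eq line k (by omega) k 0 (by omega) (by omega)
      have hdrop : line.drop k = line.get ⟨k, hlt⟩ :: line.drop (k + 1) := by
        exact List.drop_eq_getElem_cons hlt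
      have htake : line.take (k + 1) = line.take k ++ [line.get ⟨k, hlt⟩] := by
        exact List.take_succ_eq_append_getElem hlt
      rw [pvScanB, dif_pos hlt]
      by_cases hcond : line.get ⟨k, hlt⟩ = '%' ∧ pvCountBack ((line.take k).reverse) % 2 = 0
      · rw [if_pos (by rw [hbs]; exact hcond), hdrop, pvProc, if_pos hcond]
        have : (line.drop (k + 1)).length + 1 = line.length - k := by
          simp [List.length_drop]; omega
        rw [this]
      · rw [if_neg (by rw [hbs]; exact hcond), ih (k + 1) (by omega) (by omega), hdrop,
          pvProc, if_neg hcond, htake, List.reverse_append]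
        simp only [List.reverse_cons, List.reverse_nil, List.nil_append, List.singleton_append]
        rw [pvCountBack_cons, List.append_assoc]
        rfl

theorem pvSplitNL_ne_nil (cs : List Char) : pvSplitNL cs ≠ [] := by
  cases cs with
  | nil => simp [pvSplitNL]
  | cons c cs =>
    rw [pvSplitNL]
    split
    · simp
    · split <;> simp

theorem pvSplitNL_no_nl (line : List Char) (h : '\n' ∉ line) :
    pvSplitNL line = [line] := by
  induction line with
  | nil => rfl
  | cons c cs ih =>
    have hc : c ≠ '\n' := fun hh => h (hh ▸ List.mem_cons_self ..)
    rw [pvSplitNL, if_neg hc, ih (fun hm => h (List.mem_cons_of_mem _ hm))]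

theorem pvSplitNL_append (line rs : List Char) (h : '\n' ∉ line) :
    pvSplitNL (line ++ '\n' :: rs) = line :: pvSplitNL rs := by
  induction line with
  | nil => simp [pvSplitNL]
  | cons c cs ih =>
    have hc : c ≠ '\n' := fun hh => h (hh ▸ List.mem_cons_self ..)
    rw [List.cons_append, pvSplitNL, if_neg hc, ih (fun hm => h (List.mem_cons_of_mem _ hm))]

theorem pvJoinNL_cons (l : List Char) (ls : List (List Char)) (h : ls ≠ []) :
    pvJoinNL (l :: ls) = l ++ '\n' :: pvJoinNL ls := by
  cases ls with
  | nil => exact absurd rfl h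
  | cons a as => rfl

theorem pvScan0 (line : List Char) : pvScanB line 0 = pvProc 0 line := by
  have := pvScanB_eq line line.length 0 (by omega) (by omega)
  simpa [pvCountBack] using this

theorem pvMain (n : Nat) : ∀ (cs p : List Char), cs.length ≤ n → pvCountBack p = 0 →
    pvGoA p cs = pvJoinNL ((pvSplitNL cs).map (fun l => pvScanB l 0)) := by
  induction n with
  | zero =>
    intro cs p hlen hp
    have : cs = [] := List.eq_nil_of_length_eq_zero (Nat.le_zero.mp hlen)
    subst this
    simp only [pvSplitNL, List.map_cons, List.map_nil, pvJoinNL]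
    rw [pvGoA, pvScanB]
    simp
  | succ n ih =>
    intro cs p hlen hp
    have hno : '\n' ∉ cs.takeWhile (fun c => c ≠ '\n') := by
      intro hm
      have := List.mem_takeWhile_imp hm
      simp at this
    have hsplit := (List.takeWhile_append_dropWhile (p := fun c => c ≠ '\n') (l := cs)).symm
    cases hrest : cs.dropWhile (fun c => c ≠ '\n') with
    | nil =>
      conv_lhs => rw [hsplit, hrest, List.append_nil]
      conv_rhs => rw [hsplit, hrest, List.append_nil]
      rw [(pvGoA_line _ p 0 hno hp).1, pvSplitNL_no_nl _ hno]
      simp [pvJoinNL, pvScan0]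
    | cons r rs =>
      have hr : r = '\n' := by
        have h1 := List.head?_dropWhile_not (p := fun c => c ≠ '\n') (l := cs)
        rw [hrest] at h1
        simpa using h1
      subst hr
      have hlen' : rs.length ≤ n := by
        have h2 : cs.length = (cs.takeWhile (fun c => c ≠ '\n')).length + rs.length + 1 := by
          conv_lhs => rw [hsplit, hrest]
          simp
          omega
        omega
      conv_lhs => rw [hsplit, hrest]
      conv_rhs => rw [hsplit, hrest]
      rw [(pvGoA_line _ p 0 hno hp).2 rs, pvSplitNL_append _ rs hno, List.map_cons,
        pvJoinNL_cons _ _ (fun hnil => pvSplitNL_ne_nil rs (List.map_eq_nil_iff.mp hnil)),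
        ih rs ('\n' :: ((cs.takeWhile (fun c => c ≠ '\n')).reverse ++ p)) hlen' (by
          rw [pvCountBack_cons, if_neg (by decide)]), pvScan0]

-- ===== VERDICT (by name: the statement is the Claim_ definition above) =====
theorem strip_comments_preserve_spec : Claim_equal_strip_comments_preserve := by
  intro text _
  unfold Spec_strip_comments_preserve strip_comments_preserve strip_comments_preserve_alt
  exact congrArg String.mk (pvMain text.toList.length text.toList [] le_rfl rfl)
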